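-- pv_equiv track=rewrite | github.com/ooyejinn/algorithm | 프로그래머스/1/72410. 신규 아이디 추천/신규 아이디 추천.py | solution
-- ===== SOURCE A (Python) =====
-- def solution(new_id):
--     # 1. 대문자 > 소문자 치환
--     # 2. 알파벳, 숫자, -, _, . 제외한 모든 문자 제거
--     # 3. .가 2번 이상 연속될 경우 1개로 줄임
--     # 4. .가 맨 앞이나 맨 끝에 위치한다면 제거
--     # 5. 빈 문자열이라면 a 대입
--     # 6. 16자 이상일 경우 16자 이상부터 제거
--     # 7. .가 맨 뒤에 위치할 경우 함께 제거
--     # 8. 2자 이하라면, 마지막 문자를 길이가 3자 이상이 될 때까지 끝에 붙임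
--
--     answer_1 = new_id.lower()
--     dictionary = 'abcdefghijklmnopqrstuvwxyz0123456789-_.'
--     answer_2 = ''
--
--     for a in answer_1:
--         if a in dictionary:
--             answer_2 += a
--
--     answer_3 = answer_2
--     while '..' in answer_3:
--         answer_3 = answer_3.replace('..', '.')
--
--     answer_4 = answer_3.strip('.')
--
--     if not answer_4:
--         answer_5 = 'a'
--     else:
--         answer_5 = answer_4
--
--     if len(answer_5) >= 16:
--         answer_6 = answer_5[:15]
--         answer_6 = answer_6.strip('.')
--     else:
--         answer_6 = answer_5
--
--     answer_7 = answer_6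
--     while len(answer_7) <= 2:
--         answer_7 += answer_7[-1]
--
--     return answer_7
-- ===== SOURCE B (Python) =====
-- VALID = 'abcdefghijklmnopqrstuvwxyz0123456789-_'
--
-- def solution(new_id):
--     # Single pass: lowercase, drop invalid chars and collapse dot runs at once.
--     buf = []
--     for c in new_id.lower():
--         if c in VALID:
--             buf.append(c)
--         elif c == '.' and buf[-1:] != ['.']:
--             buf.append(c)
--     s = ''.join(buf).strip('.')
--     if not s:
--         s = 'a'
--     if len(s) >= 16:
--         s = s[:15].strip('.')
--     if len(s) < 3:
--         s = s.ljust(3, s[-1])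
--     return s
-- ===== Notes on version B (the rewrite author's own statement) =====
-- stated objective: simpler
-- what changed: Replaces A's three-phase cleanup (membership-filter loop building a string, then a `while '..' in s` replace loop, then strip) by one fused pass that lowercases, filters and collapses dot runs using the last buffered character, and replaces the character-by-character padding while-loop by a single ljust.
import Mathlib
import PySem

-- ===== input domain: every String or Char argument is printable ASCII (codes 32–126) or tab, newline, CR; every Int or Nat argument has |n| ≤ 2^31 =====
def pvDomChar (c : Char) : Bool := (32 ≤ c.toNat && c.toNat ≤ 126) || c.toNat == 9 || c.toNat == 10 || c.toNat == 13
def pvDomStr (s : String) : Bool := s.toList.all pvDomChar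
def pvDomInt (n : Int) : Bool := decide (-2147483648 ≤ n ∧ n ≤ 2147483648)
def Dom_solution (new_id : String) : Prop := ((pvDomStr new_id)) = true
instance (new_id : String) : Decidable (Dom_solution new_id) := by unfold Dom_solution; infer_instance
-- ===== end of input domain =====

-- B fuses A's filter loop, dot-collapsing while-replace loop into one pass and replaces the padding loop by ljust; objective: simpler.


-- ===== PORT A =====
-- dictionary = 'abcdefghijklmnopqrstuvwxyz0123456789-_.'
def dictionaryA : List Char := "abcdefghijklmnopqrstuvwxyz0123456789-_.".toList

-- while '..' in answer_3: answer_3 = answer_3.replace('..','.')   (fuel makes the loop total;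
-- each iteration with '..' present strictly shrinks the string, so length+1 fuel is enough)
def collapseLoopA (fuel : Nat) (s : List Char) : List Char :=
  match fuel with
  | 0 => s
  | f + 1 =>
    if PySem.Chars.isIn ['.', '.'] s then
      collapseLoopA f (PySem.Chars.replace s ['.', '.'] ['.'])
    else s

-- while len(answer_7) <= 2: answer_7 += answer_7[-1]   (fuel-total; on the empty string Python's
-- answer_7[-1] would raise IndexError — pyGet? returns none there; that state is unreachable)
def padLoopA (fuel : Nat) (s : List Char) : List Char :=
  match fuel with
  | 0 => s
  | f + 1 =>
    if s.length ≤ 2 then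
      match PySem.List.pyGet? s (-1) with
      | some c => padLoopA f (s ++ [c])
      | none => s
    else s

def solution (new_id : String) : String :=
  let answer1 := PySem.Chars.lower new_id.toList
  -- for a in answer_1: if a in dictionary: answer_2 += a   ('a in str' for the single char a is exactly char membership)
  let answer2 := answer1.foldl (fun acc a => if dictionaryA.contains a then acc ++ [a] else acc) []
  let answer3 := collapseLoopA (answer2.length + 1) answer2
  let answer4 := PySem.Chars.stripChars answer3 ['.']
  let answer5 := if answer4.isEmpty then ['a'] else answer4
  let answer6 := if 16 ≤ answer5.length then
      PySem.Chars.stripChars (PySem.List.slice answer5 none (some 15)) ['.']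
    else answer5
  String.ofList (padLoopA 3 answer6)

-- ===== PORT B =====
-- VALID = 'abcdefghijklmnopqrstuvwxyz0123456789-_'
def validB : List Char := "abcdefghijklmnopqrstuvwxyz0123456789-_".toList

def solution_alt (new_id : String) : String :=
  -- single fused pass: filter + collapse dot runs ('buf[-1:] != [.]' is 'getLast? ≠ some .')
  let buf := (PySem.Chars.lower new_id.toList).foldl
    (fun buf c =>
      if validB.contains c then buf ++ [c]
      else if c == '.' && buf.getLast? != some '.' then buf ++ [c]
      else buf) []
  let s1 := PySem.Chars.stripChars buf ['.']
  let s2 := if s1.isEmpty then ['a'] else s1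
  let s3 := if 16 ≤ s2.length then
      PySem.Chars.stripChars (PySem.List.slice s2 none (some 15)) ['.']
    else s2
  -- if len(s) < 3: s = s.ljust(3, s[-1])  (ljust pads on the right with the fill char; exact;
  -- on the empty string Python's s[-1] would raise — pyGet? returns none; that state is unreachable)
  let s4 := if s3.length < 3 then
      match PySem.List.pyGet? s3 (-1) with
      | some c => s3 ++ List.replicate (3 - s3.length) c
      | none => s3
    else s3
  String.ofList s4

-- ===== PRECONDITION & SPEC =====
def Spec_solution (new_id : String) (out : String) : Prop := out = solution_alt new_id
instance (new_id : String) (out : String) : Decidable (Spec_solution new_id out) := by unfold Spec_solution; infer_instance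

-- ===== CLAIM (what is proved, stated in full; the proofs are below) =====
def Claim_equal_solution : Prop := ∀ (new_id : String), Dom_solution new_id → Spec_solution new_id (solution new_id)


-- ===== LEMMAS AND PROOFS =====

def repDD : List Char → List Char
  | '.' :: '.' :: t => '.' :: repDD t
  | c :: t => c :: repDD (t : List Char)
  | [] => []

theorem repDD_cons (c : Char) (t : List Char) (hne : ∀ t', c = '.' → t = '.' :: t' → False) :
    repDD (c :: t) = c :: repDD t := by
  rw [repDD.eq_def]
  split
  · next t' heq =>
    injection heq with h1 h2
    exact (hne t' h1 h2).elim
  · next c' t' hne' heq =>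
    injection heq with h1 h2
    subst h1; subst h2; rfl
  · next heq => exact absurd heq (by simp)

theorem replace_go_eq (l : List Char) : ∀ (fuel : Nat) (acc : List Char), l.length ≤ fuel →
    PySem.Chars.replace.go ['.', '.'] ['.'] fuel l acc = acc.reverse ++ repDD l := by
  induction l using repDD.induct with
  | case1 t ih =>
    intro fuel acc h
    cases fuel with
    | zero => simp at h
    | succ f =>
      simp only [PySem.Chars.replace.go, List.isPrefixOf]
      rw [if_pos (by decide)]
      simp only [List.length_cons] at h
      rw [show List.drop ['.','.'].length ('.'::'.'::t) = t from rfl]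
      rw [ih f (['.'].reverse ++ acc) (by omega)]
      simp [repDD]
  | case2 c t hne ih =>
    intro fuel acc h
    cases fuel with
    | zero => simp at h
    | succ f =>
      simp only [PySem.Chars.replace.go]
      have hpf : List.isPrefixOf ['.', '.'] (c :: t) = false := by
        cases t with
        | nil => simp [List.isPrefixOf]
        | cons d t' =>
          simp [List.isPrefixOf]
          intro hc hd
          cases hd
          exact (hne t' hc.symm rfl).elim
      rw [hpf]
      simp only [Bool.false_eq_true, if_false]
      rw [ih f (c :: acc) (by simp at h; omega)]
      rw [repDD_cons c t hne]
      simp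
  | case3 =>
    intro fuel acc h
    cases fuel <;> simp [PySem.Chars.replace.go, repDD]

def ddC (b : Bool) : List Char → List Char
  | [] => []
  | c :: t => if c = '.' then (if b then ddC true t else '.' :: ddC true t) else c :: ddC false t

theorem ddC_repDD (b : Bool) (l : List Char) : ddC b (repDD l) = ddC b l := by
  induction l using repDD.induct generalizing b with
  | case1 t ih => simp [repDD, ddC, ih]
  | case2 c t hne ih => rw [repDD_cons c t hne]; simp [ddC, ih]
  | case3 => rfl

theorem ddC_true_eq_false(t : List Char) (h : t.head? ≠ some '.') :
    ddC true t = ddC false t := by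
  cases t with
  | nil => rfl
  | cons c t =>
    have hc : ¬ c = '.' := by simpa using h
    simp [ddC, hc]

theorem ddC_eq_self (l : List Char) (h : ¬ ['.', '.'] <:+: l) : ddC false l = l := by
  induction l with
  | nil => rfl
  | cons c t ih =>
    rw [List.infix_cons_iff, not_or] at h
    obtain ⟨h1, h2⟩ := h
    by_cases hc : c = '.'
    · subst hc
      have ht : t.head? ≠ some '.' := by
        intro hh
        cases t with
        | nil => simp at hh
        | cons d t' =>
          simp at hh; subst hh
          exact h1 (by simp [List.prefix_cons_iff])
      simp [ddC, ddC_true_eq_false t ht, ih h2]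
    · simp [ddC, hc, ih h2]

theorem repDD_length_le (l : List Char) : (repDD l).length ≤ l.length := by
  induction l using repDD.induct with
  | case1 t ih => simp [repDD]; omega
  | case2 c t hne ih => rw [repDD_cons c t hne]; simp; omega
  | case3 => simp [repDD]

theorem repDD_length_lt (l : List Char) (h : ['.', '.'] <:+: l) :
    (repDD l).length < l.length := by
  induction l using repDD.induct with
  | case1 t ih => have := repDD_length_le t; simp [repDD]; omega
  | case2 c t hne ih =>
    rw [List.infix_cons_iff] at h
    have hinf : ['.', '.'] <:+: t := by
      rcases h with h | h
      · exfalso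
        rcases h with ⟨u, hu⟩
        cases t with
        | nil => simp at hu
        | cons d t' =>
          simp at hu
          obtain ⟨hc, hd, -⟩ := hu
          exact (hne t' hc.symm (by rw [← hd])).elim
      · exact h
    rw [repDD_cons c t hne]
    have := ih hinf
    simp; omega
  | case3 => simp at h

theorem replace_eq_repDD (l : List Char) :
    PySem.Chars.replace l ['.', '.'] ['.'] = repDD l := by
  rw [PySem.Chars.replace]
  simpa using replace_go_eq l l.length [] le_rfl

theorem collapseLoopA_eq (fuel : Nat) (l : List Char) (h : l.length < fuel) :
    collapseLoopA fuel l = ddC false l := by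
  induction fuel generalizing l with
  | zero => omega
  | succ f ih =>
    rw [collapseLoopA]
    by_cases hin : PySem.Chars.isIn ['.', '.'] l = true
    · have hinf := (PySem.Chars.isIn_iff_infix _ _).mp hin
      rw [if_pos hin, replace_eq_repDD,
        ih (repDD l) (by have := repDD_length_lt l hinf; omega), ddC_repDD]
    · rw [if_neg hin]
      exact (ddC_eq_self l ((PySem.Chars.isIn_eq_false_iff _ _).mp (by simpa using hin))).symm

theorem dictA_split : dictionaryA = validB ++ ['.'] := by decide

theorem dot_mem_dictA : ('.' : Char) ∈ dictionaryA := by decide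

theorem dictA_contains (c : Char) :
    (dictionaryA.contains c = true) ↔ (validB.contains c = true ∨ c = '.') := by
  rw [dictA_split, List.contains_append]
  simp

theorem validB_not_dot (c : Char) (h : validB.contains c = true) : ¬ c = '.' := by
  intro hc; subst hc; revert h; decide

-- B's fused fold equals dot-run collapse of the filtered string
theorem foldB_eq (l : List Char) (buf : List Char) :
    l.foldl (fun buf c =>
      if validB.contains c then buf ++ [c]
      else if c == '.' && buf.getLast? != some '.' then buf ++ [c]
      else buf) buf
    = buf ++ ddC (buf.getLast? == some '.')
        (List.filter (fun c => dictionaryA.contains c) l) := by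
  induction l generalizing buf with
  | nil => simp [ddC]
  | cons c t ih =>
    simp only [List.foldl_cons]
    by_cases hv : validB.contains c = true
    · have hcd : ¬ c = '.' := validB_not_dot c hv
      have hmem : c ∈ dictionaryA := by
        have := (dictA_contains c).mpr (Or.inl hv); simpa using this
      rw [if_pos hv, ih]
      have hlast : ((buf ++ [c]).getLast? == some '.') = false := by
        simp [List.getLast?_append, hcd]
      rw [hlast]
      simp only [List.filter_cons]
      rw [if_pos (by simpa using hmem)]
      simp [ddC, hcd]
    · by_cases hc : c = '.'
      · subst hc
        have hfc : List.filter (fun c => dictionaryA.contains c) ('.' :: t)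
            = '.' :: List.filter (fun c => dictionaryA.contains c) t := by
          simp only [List.filter_cons]
          rw [if_pos (by simpa using dot_mem_dictA)]
        by_cases hl : buf.getLast? = some '.'
        · rw [if_neg hv, if_neg (by simp [hl]), ih, hfc]
          simp [ddC, hl]
        · rw [if_neg hv, if_pos (by simp [hl]), ih, hfc]
          have hlast : ((buf ++ ['.']).getLast? == some '.') = true := by
            simp [List.getLast?_append]
          rw [hlast]
          simp [ddC, hl]
      · have hd : ¬ c ∈ dictionaryA := by
          intro hm
          rcases (dictA_contains c).mp (by simpa using hm) with h | h
          · exact hv h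
          · exact hc h
        rw [if_neg hv, if_neg (by simp [hc]), ih]
        simp only [List.filter_cons]
        rw [if_neg (by simpa using hd)]

theorem dropWhile_head? (p : Char → Bool) (l : List Char) (c : Char)
    (h : (l.dropWhile p).head? = some c) : p c = false := by
  induction l with
  | nil => simp at h
  | cons a t ih =>
    rw [List.dropWhile_cons] at h
    split at h
    · exact ih h
    · next hp => simp at h; subst h; simpa using hp

theorem stripChars_head? (s : List Char) (chars : List Char) (c : Char)
    (h : (PySem.Chars.stripChars s chars).head? = some c) : chars.contains c = false := by
  rw [PySem.Chars.stripChars] at h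
  set p := fun c => chars.contains c with hp
  set d := List.dropWhile p s with hd
  have hpre : (List.dropWhile p d.reverse).reverse <+: d := by
    rw [← List.reverse_suffix]
    simpa using List.dropWhile_suffix p (l := d.reverse)
  obtain ⟨ttt, htt⟩ := hpre
  have hhead : d.head? = some c := by
    rw [← htt, List.head?_append, h]; rfl
  exact dropWhile_head? p s c hhead

theorem stripChars_ne_nil (s : List Char) (chars : List Char) (c : Char)
    (hh : s.head? = some c) (hc : chars.contains c = false) :
    PySem.Chars.stripChars s chars ≠ [] := by
  have hcm : ¬ c ∈ chars := by simpa using hc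
  rw [PySem.Chars.stripChars]
  have hds : List.dropWhile (fun c => chars.contains c) s = s := by
    cases s with
    | nil => simp at hh
    | cons a t => simp at hh; subst hh; simp [hcm]
  rw [hds]
  intro hcon
  have hnil : List.dropWhile (fun c => chars.contains c) s.reverse = [] := by
    simpa using congrArg List.reverse hcon
  rw [List.dropWhile_eq_nil_iff] at hnil
  have hcmem : c ∈ s := by
    cases s with
    | nil => simp at hh
    | cons a t => simp at hh; subst hh; simp
  have := hnil c (by simpa using hcmem)
  simp [hcm] at this

theorem padLoopA_eq (s : List Char) (h : s ≠ []) :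
    padLoopA 3 s = (if s.length < 3 then
      match PySem.List.pyGet? s (-1) with
      | some c => s ++ List.replicate (3 - s.length) c
      | none => s
    else s) := by
  match s with
  | [a] => simp [padLoopA, PySem.List.pyGet?, PySem.List.pyIdx?]
  | [a, b] => simp [padLoopA, PySem.List.pyGet?, PySem.List.pyIdx?]
  | a :: b :: c :: t => simp [padLoopA]

theorem filterA (l : List Char) :
    List.foldl (fun acc a => if dictionaryA.contains a then acc ++ [a] else acc) ([] : List Char) l
      = List.filter (fun a => dictionaryA.contains a) l := by
  simpa using PySem.List.foldl_append_if (fun a => dictionaryA.contains a) (fun a => a) l []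

theorem collapseA (l : List Char) : collapseLoopA (l.length + 1) l = ddC false l :=
  collapseLoopA_eq _ _ (Nat.lt_succ_self _)

theorem foldB_nil (l : List Char) :
    l.foldl (fun buf c =>
      if validB.contains c then buf ++ [c]
      else if c == '.' && buf.getLast? != some '.' then buf ++ [c]
      else buf) ([] : List Char)
    = ddC false (List.filter (fun c => dictionaryA.contains c) l) := by
  simpa using foldB_eq l []

theorem good_strip (s : List Char) (c : Char)
    (h : (PySem.Chars.stripChars s ['.']).head? = some c) : ¬ c = '.' := by
  have := stripChars_head? s ['.'] c h
  simpa using this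

theorem step6_ne_nil (X : List Char) :
    (if 16 ≤ (if (PySem.Chars.stripChars X ['.']).isEmpty then ['a']
              else PySem.Chars.stripChars X ['.']).length then
       PySem.Chars.stripChars
         (PySem.List.slice (if (PySem.Chars.stripChars X ['.']).isEmpty then ['a']
                            else PySem.Chars.stripChars X ['.']) none (some 15)) ['.']
     else (if (PySem.Chars.stripChars X ['.']).isEmpty then ['a']
           else PySem.Chars.stripChars X ['.'])) ≠ [] := by
  set s1 := PySem.Chars.stripChars X ['.'] with hs1
  set s2 := if s1.isEmpty then ['a'] else s1 with hs2
  have h2 : s2 ≠ [] ∧ ∀ c, s2.head? = some c → ¬ c = '.' := by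
    by_cases he : s1.isEmpty
    · rw [hs2, if_pos he]
      exact ⟨by simp, by intro c hc; simp at hc; subst hc; decide⟩
    · rw [hs2, if_neg he]
      refine ⟨by simpa [List.isEmpty_iff] using he, ?_⟩
      intro c hc
      exact good_strip X c hc
  by_cases hlen : 16 ≤ s2.length
  · rw [if_pos hlen]
    obtain ⟨a, t, ht⟩ := List.exists_cons_of_ne_nil h2.1
    have hc : s2.head? = some a := by rw [ht]; rfl
    have hcd : ¬ a = '.' := h2.2 a hc
    have hhead : (PySem.List.slice s2 none (some 15)).head? = some a := by
      rw [PySem.List.slice_to s2 (by norm_num), ht,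
        show Int.toNat 15 = 15 from rfl]
      simp
    exact stripChars_ne_nil _ ['.'] a hhead (by simpa using hcd)
  · rw [if_neg hlen]
    exact h2.1

-- ===== VERDICT (by name: the statement is the Claim_ definition above) =====
theorem solution_spec : Claim_equal_solution := by
  intro new_id _
  unfold Spec_solution solution solution_alt
  simp only [filterA, foldB_nil, collapseA]
  rw [padLoopA_eq _ (step6_ne_nil _)]
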